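-- pv_equiv track=rewrite | github.com/LudiiaX/DailyCodingChallenge | freeCodeCamp/01-2026/29.py | separate_letters_and_numbers
-- ===== SOURCE A (Python) =====
-- def separate_letters_and_numbers(s):
--     res = [s[0]]
--     for i in range(1, len(s)):
--         before = s[i-1].isdigit()
--         after = s[i].isdigit()
--         if before != after:
--             res.append("-")
--             res.append(s[i])
--         else:
--             res.append(s[i])
--     return "".join(res)
-- ===== SOURCE B (Python) =====
-- def separate_letters_and_numbers(s):
--     runs = []
--     prev_key = None
--     for ch in s:
--         k = ch.isdigit()
--         if k == prev_key:
--             runs[-1].append(ch)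
--         else:
--             runs.append([ch])
--             prev_key = k
--     return "-".join("".join(r) for r in runs)
-- ===== Notes on version B (the rewrite author's own statement) =====
-- stated objective: alternative
-- what changed: B groups the string into maximal runs of same character class (digit vs non-digit) in one pass and joins the runs with a dash separator, instead of A's adjacent-pair comparison loop that interleaves dashes while copying characters one by one.
-- outside the precondition, e.g. on separate_letters_and_numbers(''): A raises IndexError, B returns ''
import Mathlib
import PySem

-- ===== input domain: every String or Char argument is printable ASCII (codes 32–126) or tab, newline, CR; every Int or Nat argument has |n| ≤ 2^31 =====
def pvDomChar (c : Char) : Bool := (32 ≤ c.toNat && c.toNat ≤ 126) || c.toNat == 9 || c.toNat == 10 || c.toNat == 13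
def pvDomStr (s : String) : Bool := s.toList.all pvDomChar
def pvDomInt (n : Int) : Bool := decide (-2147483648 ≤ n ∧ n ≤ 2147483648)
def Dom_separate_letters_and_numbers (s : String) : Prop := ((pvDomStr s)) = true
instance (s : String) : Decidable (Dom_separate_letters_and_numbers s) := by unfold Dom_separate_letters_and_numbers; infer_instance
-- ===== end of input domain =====

-- B replaces A's adjacent-pair comparison loop by grouping the string into maximal
-- same-class runs and joining them with a dash separator (alternative one-pass decomposition).


-- ===== PORT A =====
-- loop body: before = s[i-1].isdigit(); after = s[i].isdigit(); append "-" then s[i] at a class change, else s[i]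
def pvStepA (cs : List Char) (res : List Char) (i : Int) : List Char :=
  let before := PySem.Chars.isdigit (PySem.List.pyGetD cs (i - 1) ' ')
  let after := PySem.Chars.isdigit (PySem.List.pyGetD cs i ' ')
  if before != after then (res ++ ['-']) ++ [PySem.List.pyGetD cs i ' ']
  else res ++ [PySem.List.pyGetD cs i ' ']

-- res = [s[0]]; for i in range(1, len(s)): … ; "".join(res)
def separate_letters_and_numbers (s : String) : String :=
  let cs := s.toList
  let res : List Char := [PySem.List.pyGetD cs 0 ' ']
  String.ofList ((PySem.List.pyRange 1 (PySem.Str.len s) 1).foldl (pvStepA cs) res)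

-- ===== PORT B =====
-- runs[-1].append(ch): append ch to the last run
def pvAppendLast : List (List Char) → Char → List (List Char)
  | [], _ => []
  | [g], c => [g ++ [c]]
  | g :: gs, c => g :: pvAppendLast gs c

-- loop body: k = ch.isdigit(); extend the last run if k == prev_key, else start a new run [ch]
def pvStepB (st : List (List Char) × Option Bool) (ch : Char) : List (List Char) × Option Bool :=
  let k := PySem.Chars.isdigit ch
  if st.2 = some k then (pvAppendLast st.1 ch, st.2)
  else (st.1 ++ [[ch]], some k)

-- one pass over the characters, then "-".join of the runs
def separate_letters_and_numbers_alt (s : String) : String :=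
  let st := s.toList.foldl pvStepB ([], none)
  String.ofList (PySem.Chars.join ['-'] st.1)

-- ===== PRECONDITION & SPEC =====
-- Pre_ excludes only the empty string, on which Python A raises IndexError (s[0]).
def Pre_separate_letters_and_numbers (s : String) : Prop := s ≠ ""
instance (s : String) : Decidable (Pre_separate_letters_and_numbers s) := by unfold Pre_separate_letters_and_numbers; infer_instance
def pvWitness_separate_letters_and_numbers : String := "ab12 cd7"

def Spec_separate_letters_and_numbers (s : String) (out : String) : Prop := out = separate_letters_and_numbers_alt s
instance (s : String) (out : String) : Decidable (Spec_separate_letters_and_numbers s out) := by unfold Spec_separate_letters_and_numbers; infer_instance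

-- ===== CLAIM (what is proved, stated in full; the proofs are below) =====
def Claim_equal_separate_letters_and_numbers : Prop := ∀ (s : String), Dom_separate_letters_and_numbers s → Pre_separate_letters_and_numbers s → Spec_separate_letters_and_numbers s (separate_letters_and_numbers s)

-- ===== LEMMAS AND PROOFS =====

-- common reference value: the tail of both outputs, driven by the class of the previous character
def pvRun (k : Bool) : List Char → List Char
  | [] => []
  | c :: cs => (if k != PySem.Chars.isdigit c then ['-', c] else [c]) ++ pvRun (PySem.Chars.isdigit c) cs

theorem pvAppendLast_snoc (gs : List (List Char)) (g : List Char) (c : Char) :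
    pvAppendLast (gs ++ [g]) c = gs ++ [g ++ [c]] := by
  induction gs with
  | nil => rfl
  | cons h t ih =>
    cases t with
    | nil => simp [pvAppendLast]
    | cons h' t' => simpa [pvAppendLast] using ih

theorem pvJoin_snoc (sep : List Char) (gs : List (List Char)) (x : List Char) (h : gs ≠ []) :
    PySem.Chars.join sep (gs ++ [x]) = PySem.Chars.join sep gs ++ sep ++ x := by
  induction gs with
  | nil => exact absurd rfl h
  | cons g t ih =>
    cases t with
    | nil => simp [PySem.Chars.join, List.intercalate, List.intersperse]
    | cons g' t' =>
      have hih := ih (by simp)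
      simp only [PySem.Chars.join, List.cons_append] at hih ⊢
      rw [show (List.intercalate sep (g :: g' :: (t' ++ [x]))) = g ++ sep ++ List.intercalate sep (g' :: (t' ++ [x])) by simp [List.intercalate, List.intersperse],
          show (List.intercalate sep (g :: g' :: t')) = g ++ sep ++ List.intercalate sep (g' :: t') by simp [List.intercalate, List.intersperse],
          hih]
      simp

theorem pvJoin_snoc_append (sep : List Char) (gs : List (List Char)) (g : List Char) (c : Char) :
    PySem.Chars.join sep (gs ++ [g ++ [c]]) = PySem.Chars.join sep (gs ++ [g]) ++ [c] := by
  cases gs with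
  | nil => simp [PySem.Chars.join, List.intercalate]
  | cons h t =>
    rw [pvJoin_snoc sep (h :: t) (g ++ [c]) (by simp), pvJoin_snoc sep (h :: t) g (by simp)]
    simp

-- B's loop invariant: from a non-empty run list whose last run's class is k,
-- the remaining characters contribute exactly pvRun k rest to the joined output.
theorem pvFoldB (rest : List Char) : ∀ (gs : List (List Char)) (g : List Char) (k : Bool),
    PySem.Chars.join ['-'] (rest.foldl pvStepB (gs ++ [g], some k)).1
    = PySem.Chars.join ['-'] (gs ++ [g]) ++ pvRun k rest := by
  induction rest with
  | nil => intro gs g k; simp [pvRun]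
  | cons c cs ih =>
    intro gs g k
    by_cases hk : k = PySem.Chars.isdigit c
    · simp only [List.foldl_cons, pvStepB, hk, if_true, pvAppendLast_snoc]
      rw [ih gs (g ++ [c]) (PySem.Chars.isdigit c), pvJoin_snoc_append]
      simp [pvRun, ← hk, List.append_assoc]
    · have hne : ¬ (some k = some (PySem.Chars.isdigit c)) := by simpa using hk
      simp only [List.foldl_cons, pvStepB, if_neg hne]
      rw [show gs ++ [g] ++ [[c]] = (gs ++ [g]) ++ [[c]] from rfl,
          ih (gs ++ [g]) [c] (PySem.Chars.isdigit c),
          pvJoin_snoc ['-'] (gs ++ [g]) [c] (by simp)]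
      have hb : (k != PySem.Chars.isdigit c) = true := by
        cases k <;> cases h : PySem.Chars.isdigit c <;> simp_all
      simp [pvRun, hb, List.append_assoc]

theorem pvGetD_mid (pref rest : List Char) (c : Char) :
    PySem.List.pyGetD (pref ++ c :: rest) (pref.length : Int) ' ' = c := by
  rw [PySem.List.pyGetD_natCast]
  simp

-- A's loop invariant: the fold over indices pref.length+1 … n, on the list pref ++ c :: rest,
-- appends exactly pvRun (isdigit c) rest to the accumulator.
theorem pvFoldA (rest : List Char) : ∀ (pref : List Char) (c : Char) (acc : List Char),
    (PySem.List.pyRange ((pref.length : Int) + 1) (((pref ++ c :: rest).length : Int)) 1).foldl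
      (pvStepA (pref ++ c :: rest)) acc
    = acc ++ pvRun (PySem.Chars.isdigit c) rest := by
  induction rest with
  | nil =>
    intro pref c acc
    rw [PySem.List.pyRange_one_eq_nil (by simp)]
    simp [pvRun]
  | cons c' rest' ih =>
    intro pref c acc
    have hlt : ((pref.length : Int) + 1) < (((pref ++ c :: c' :: rest').length : Int)) := by
      simp
    rw [PySem.List.pyRange_one_cons hlt]
    simp only [List.foldl_cons]
    have h1 : PySem.List.pyGetD (pref ++ c :: c' :: rest') ((pref.length : Int) + 1 - 1) ' ' = c := by
      have := pvGetD_mid pref (c' :: rest') c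
      simp only [show (pref.length : Int) + 1 - 1 = (pref.length : Int) by ring]
      exact this
    have h2 : PySem.List.pyGetD (pref ++ c :: c' :: rest') ((pref.length : Int) + 1) ' ' = c' := by
      have := pvGetD_mid (pref ++ [c]) rest' c'
      simpa [List.append_assoc, add_comm] using this
    have hstep : pvStepA (pref ++ c :: c' :: rest') acc ((pref.length : Int) + 1)
        = acc ++ (if PySem.Chars.isdigit c != PySem.Chars.isdigit c' then ['-', c'] else [c']) := by
      simp only [pvStepA, h1, h2]
      by_cases hb : (PySem.Chars.isdigit c != PySem.Chars.isdigit c') = true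
      · simp [hb]
      · simp [hb]
    rw [hstep]
    have hre : pref ++ c :: c' :: rest' = (pref ++ [c]) ++ c' :: rest' := by simp
    have hlen : ((pref.length : Int) + 1) + 1 = (((pref ++ [c]).length : Int) + 1) := by
      simp
    rw [hre, hlen, ih (pref ++ [c]) c']
    simp [pvRun, List.append_assoc]

theorem pvToList_ne_nil (s : String) (h : s ≠ "") : s.toList ≠ [] := by
  intro hl
  exact h (by
    have := congrArg String.ofList hl
    simpa using this)

theorem separate_letters_and_numbers_spec : Claim_equal_separate_letters_and_numbers := by
  intro s _ hpre
  unfold Spec_separate_letters_and_numbers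
  obtain ⟨c, rest, hl⟩ : ∃ c rest, s.toList = c :: rest := by
    cases h : s.toList with
    | nil => exact absurd h (pvToList_ne_nil s hpre)
    | cons c rest => exact ⟨c, rest, rfl⟩
  unfold separate_letters_and_numbers separate_letters_and_numbers_alt
  simp only [hl]
  -- A side
  have hlen : PySem.Str.len s = (((c :: rest).length : Int)) := by
    rw [PySem.Str.len_eq, hl]
  have ha : (PySem.List.pyRange 1 (PySem.Str.len s) 1).foldl (pvStepA (c :: rest))
      [PySem.List.pyGetD (c :: rest) 0 ' ']
      = [PySem.List.pyGetD (c :: rest) 0 ' '] ++ pvRun (PySem.Chars.isdigit c) rest := by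
    rw [hlen]
    have := pvFoldA rest [] c [PySem.List.pyGetD (c :: rest) 0 ' ']
    simpa using this
  have h0 : PySem.List.pyGetD (c :: rest) (0 : Int) ' ' = c := by
    exact pvGetD_mid [] rest c
  -- B side
  have hb0 : (c :: rest).foldl pvStepB ([], none) = rest.foldl pvStepB ([] ++ [[c]], some (PySem.Chars.isdigit c)) := by
    simp [pvStepB]
  have hb : PySem.Chars.join ['-'] ((c :: rest).foldl pvStepB ([], none)).1
      = [c] ++ pvRun (PySem.Chars.isdigit c) rest := by
    rw [hb0, pvFoldB rest [] [c] (PySem.Chars.isdigit c)]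
    simp [PySem.Chars.join, List.intercalate]
  rw [ha, h0, hb]
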